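-- pv_equiv track=rewrite | github.com/vigneshsabapathi/Spanning-Tree-Shortest-Path-Algorithms-with-Different-Constraints | python/algo_viz/gui/info_panel.py | _format_union_find
-- ===== SOURCE A (Python) =====
-- def _format_union_find(uf_state: dict) -> str:
--     """Group vertices by their root and display as components."""
--     # uf_state maps vertex -> parent; walk to root
--     def find_root(v, state):
--         seen = []
--         while state.get(v, v) != v:
--             seen.append(v)
--             v = state[v]
--         return v
--
--     components: dict[int, list[int]] = {}
--     for v in sorted(uf_state.keys()):
--         root = find_root(v, uf_state)
--         components.setdefault(root, []).append(v)
--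
--     lines = ["Union-Find Components:"]
--     for root in sorted(components):
--         members = components[root]
--         lines.append(f"  {{{', '.join(str(m) for m in members)}}}")
--     return "\n".join(lines)
-- ===== SOURCE B (Python) =====
-- def _format_union_find(uf_state: dict) -> str:
--     """Group vertices by their root and display as components.
--
--     Memoized root lookup: every vertex on a find path is cached with its
--     root, so each vertex's chain is walked at most once overall.
--     """
--     root_of: dict = {}
--
--     def find(v):
--         path = []
--         while v not in root_of and uf_state.get(v, v) != v:
--             path.append(v)
--             v = uf_state[v]
--         r = root_of.get(v, v)
--         for u in path:
--             root_of[u] = r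
--         return r
--
--     groups: dict = {}
--     for v in sorted(uf_state):
--         groups.setdefault(find(v), []).append(v)
--
--     parts = ["  {" + ", ".join(str(m) for m in groups[r]) + "}"
--              for r in sorted(groups)]
--     return "\n".join(["Union-Find Components:"] + parts)
-- ===== Notes on version B (the rewrite author's own statement) =====
-- stated objective: alternative
-- what changed: B caches the root of every vertex visited on a find path (path-compression memoization), so each parent chain is walked once overall rather than once per vertex, and builds the output lines by comprehension instead of an accumulator loop; on the generated short-chain inputs this is not measurably faster.
import Mathlib
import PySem

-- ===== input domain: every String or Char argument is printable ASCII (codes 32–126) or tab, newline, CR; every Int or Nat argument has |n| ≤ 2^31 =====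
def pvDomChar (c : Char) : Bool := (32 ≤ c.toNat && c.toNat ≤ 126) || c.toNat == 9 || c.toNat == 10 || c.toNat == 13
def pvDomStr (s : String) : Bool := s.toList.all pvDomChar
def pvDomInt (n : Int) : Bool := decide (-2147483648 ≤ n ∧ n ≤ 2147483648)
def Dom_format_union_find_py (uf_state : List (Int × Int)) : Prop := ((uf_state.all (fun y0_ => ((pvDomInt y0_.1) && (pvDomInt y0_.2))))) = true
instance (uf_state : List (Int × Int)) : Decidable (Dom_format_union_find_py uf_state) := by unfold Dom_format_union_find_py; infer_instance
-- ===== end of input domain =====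

-- B memoizes the root of every vertex seen on a find path so each parent chain is walked once overall (objective: alternative).

-- ===== PORT A =====
-- A's `find_root`: walk parents until a fixpoint; fuel (never exhausted under Pre_) makes the
-- Python `while` total.  `state[v]` inside the loop equals `state.get(v, v)` since the loop
-- guard guarantees v is a key, so both are ported as `d.getD v v` (exact).
def aFindRoot (d : PySem.Dict Int Int) : Nat → Int → Int
  | 0, v => v
  | f + 1, v => if d.getD v v ≠ v then aFindRoot d f (d.getD v v) else v

def format_union_find_py (uf_state : List (Int × Int)) : String :=
  let state := PySem.Dict.ofList uf_state
  -- components.setdefault(root, []).append(v)  =  modify root [] (· ++ [v])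
  let components := (PySem.List.sorted state.keys (fun x => x) false).foldl
      (fun comps v => comps.modify (aFindRoot state (state.size + 1) v) [] (· ++ [v]))
      PySem.Dict.empty
  let lines := (PySem.List.sorted components.keys (fun x => x) false).foldl
      (fun lines root =>
        lines ++ ["  {" ++ PySem.Str.join ", " ((components.getD root []).map PySem.Int.toStr) ++ "}"])
      ["Union-Find Components:"]
  PySem.Str.join "\n" lines

-- ===== PORT B =====
-- B's `find`: walk parents while uncached, then write the found root back for the whole path.
def bFind (d : PySem.Dict Int Int) : Nat → PySem.Dict Int Int → List Int → Int → Int × PySem.Dict Int Int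
  | 0, cache, path, v =>
      let r := cache.getD v v
      (r, path.foldl (fun c u => c.insert u r) cache)
  | f + 1, cache, path, v =>
      if cache.contains v = false ∧ d.getD v v ≠ v then
        bFind d f cache (path ++ [v]) (d.getD v v)
      else
        let r := cache.getD v v
        (r, path.foldl (fun c u => c.insert u r) cache)

def format_union_find_py_alt (uf_state : List (Int × Int)) : String :=
  let uf := PySem.Dict.ofList uf_state
  let groups := ((PySem.List.sorted uf.keys (fun x => x) false).foldl
      (fun (acc : PySem.Dict Int (List Int) × PySem.Dict Int Int) v =>
        let p := bFind uf (uf.size + 1) acc.2 [] v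
        (acc.1.modify p.1 [] (· ++ [v]), p.2))
      (PySem.Dict.empty, PySem.Dict.empty)).1
  let parts := (PySem.List.sorted groups.keys (fun x => x) false).map
      (fun r => "  {" ++ PySem.Str.join ", " ((groups.getD r []).map PySem.Int.toStr) ++ "}")
  PySem.Str.join "\n" ("Union-Find Components:" :: parts)

-- ===== PRECONDITION & SPEC =====
-- Pre_ excludes cyclic parent chains, on which Python A's `while` loop never terminates
-- (A returns on exactly the acyclic states: every key's parent chain reaches a fixpoint).
def Pre_format_union_find_py (uf_state : List (Int × Int)) : Prop :=
  let d := PySem.Dict.ofList uf_state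
  ∀ v ∈ d.keys, ∃ k ∈ List.range (d.size + 1),
    (fun w => d.getD w w)^[k + 1] v = (fun w => d.getD w w)^[k] v
instance (uf_state : List (Int × Int)) : Decidable (Pre_format_union_find_py uf_state) := by
  unfold Pre_format_union_find_py; infer_instance

def pvWitness_format_union_find_py : (List (Int × Int)) := [(1, 2), (2, 2), (5, 3)]

def Spec_format_union_find_py (uf_state : List (Int × Int)) (out : String) : Prop := out = format_union_find_py_alt uf_state
instance (uf_state : List (Int × Int)) (out : String) : Decidable (Spec_format_union_find_py uf_state out) := by unfold Spec_format_union_find_py; infer_instance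

-- ===== CLAIM (what is proved, stated in full; the proofs are below) =====
def Claim_equal_format_union_find_py : Prop := ∀ (uf_state : List (Int × Int)), Dom_format_union_find_py uf_state → Pre_format_union_find_py uf_state → Spec_format_union_find_py uf_state (format_union_find_py uf_state)


-- ===== LEMMAS AND PROOFS =====

-- termination of the parent chain from v: some iterate within d.size steps is a fixpoint
def TermAt (d : PySem.Dict Int Int) (v : Int) : Prop :=
  ∃ k ∈ List.range (d.size + 1), (fun w => d.getD w w)^[k + 1] v = (fun w => d.getD w w)^[k] v

theorem aFindRoot_of_fix (d : PySem.Dict Int Int) :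
    ∀ (k : Nat) (f : Nat) (v : Int),
      (fun w => d.getD w w)^[k + 1] v = (fun w => d.getD w w)^[k] v → k ≤ f →
      aFindRoot d f v = (fun w => d.getD w w)^[k] v := by
  intro k
  induction k with
  | zero =>
      intro f v hfix _
      have hfix' : d.getD v v = v := by simpa using hfix
      cases f with
      | zero => rfl
      | succ f => simp [aFindRoot, hfix']
  | succ k ih =>
      intro f v hfix hle
      cases f with
      | zero => omega
      | succ f =>
        by_cases hv : d.getD v v = v
        · have hall : ∀ n, (fun w => d.getD w w)^[n] v = v := fun n =>
            Function.iterate_fixed (f := fun w => d.getD w w) hv n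
          simp [aFindRoot, hv, hall]
        · have hstep : (fun w => d.getD w w)^[k + 1] (d.getD v v)
              = (fun w => d.getD w w)^[k] (d.getD v v) := by
            have h1 : (fun w => d.getD w w)^[k + 1 + 1] v
                = (fun w => d.getD w w)^[k + 1] (d.getD v v) :=
              Function.iterate_succ_apply (fun w => d.getD w w) (k + 1) v
            have h2 : (fun w => d.getD w w)^[k + 1] v
                = (fun w => d.getD w w)^[k] (d.getD v v) :=
              Function.iterate_succ_apply (fun w => d.getD w w) k v
            rw [h1, h2] at hfix
            exact hfix
          have hrec := ih f (d.getD v v) hstep (by omega)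
          have h2 : (fun w => d.getD w w)^[k + 1] v
              = (fun w => d.getD w w)^[k] (d.getD v v) :=
            Function.iterate_succ_apply (fun w => d.getD w w) k v
          simp only [aFindRoot, ne_eq, hv, not_false_iff, if_pos]
          rw [h2]
          exact hrec

theorem termAt_all (uf_state : List (Int × Int))
    (hpre : Pre_format_union_find_py uf_state) :
    ∀ v, TermAt (PySem.Dict.ofList uf_state) v := by
  intro v
  set d := PySem.Dict.ofList uf_state with hd
  by_cases hv : v ∈ d.keys
  · exact hpre v hv
  · refine ⟨0, List.mem_range.mpr (by omega), ?_⟩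
    have hc : d.contains v = false := by
      cases h : d.contains v
      · rfl
      · exact absurd ((PySem.Dict.contains_iff_mem_keys d v).mp h) hv
    simpa using PySem.Dict.getD_of_not_contains d v hc

theorem troot_step (d : PySem.Dict Int Int) (v : Int) (h : TermAt d v)
    (hne : d.getD v v ≠ v) :
    aFindRoot d (d.size + 1) (d.getD v v) = aFindRoot d (d.size + 1) v
      ∧ TermAt d (d.getD v v) := by
  obtain ⟨k, hk, hfix⟩ := h
  rw [List.mem_range] at hk
  cases k with
  | zero => exact absurd (by simpa using hfix) hne
  | succ k =>
    have hstep : (fun w => d.getD w w)^[k + 1] (d.getD v v)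
        = (fun w => d.getD w w)^[k] (d.getD v v) := by
      have h1 : (fun w => d.getD w w)^[k + 1 + 1] v
          = (fun w => d.getD w w)^[k + 1] (d.getD v v) :=
        Function.iterate_succ_apply (fun w => d.getD w w) (k + 1) v
      have h2 : (fun w => d.getD w w)^[k + 1] v
          = (fun w => d.getD w w)^[k] (d.getD v v) :=
        Function.iterate_succ_apply (fun w => d.getD w w) k v
      rw [h1, h2] at hfix
      exact hfix
    refine ⟨?_, k, List.mem_range.mpr (by omega), hstep⟩
    rw [aFindRoot_of_fix d k (d.size + 1) (d.getD v v) hstep (by omega),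
        aFindRoot_of_fix d (k + 1) (d.size + 1) v hfix (by omega)]
    exact (Function.iterate_succ_apply (fun w => d.getD w w) k v).symm

-- cache invariant: every cached entry is the true root
def CacheInv (d cache : PySem.Dict Int Int) : Prop :=
  ∀ u r, cache.get? u = some r → r = aFindRoot d (d.size + 1) u

theorem inv_writeback (d : PySem.Dict Int Int) (r : Int) :
    ∀ (path : List Int) (cache : PySem.Dict Int Int), CacheInv d cache →
      (∀ u ∈ path, aFindRoot d (d.size + 1) u = r) →
      CacheInv d (path.foldl (fun c u => c.insert u r) cache) := by
  intro path
  induction path with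
  | nil => intro cache hinv _; exact hinv
  | cons u0 rest ih =>
      intro cache hinv hpath
      simp only [List.foldl_cons]
      refine ih (cache.insert u0 r) ?_ (fun u hu => hpath u (by simp [hu]))
      intro u r' hget
      rw [PySem.Dict.get?_insert] at hget
      by_cases hu : u = u0
      · rw [if_pos hu] at hget
        cases hget
        rw [hu]
        exact (hpath u0 (by simp)).symm
      · rw [if_neg hu] at hget
        exact hinv u r' hget

theorem bFind_spec (d : PySem.Dict Int Int) :
    ∀ (f : Nat) (v : Int) (cache : PySem.Dict Int Int) (path : List Int),
      CacheInv d cache →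
      (∀ u ∈ path, aFindRoot d (d.size + 1) u = aFindRoot d (d.size + 1) v) →
      (∃ k, k < f ∧ k ≤ d.size ∧
        (fun w => d.getD w w)^[k + 1] v = (fun w => d.getD w w)^[k] v) →
      (bFind d f cache path v).1 = aFindRoot d (d.size + 1) v
        ∧ CacheInv d (bFind d f cache path v).2 := by
  intro f
  induction f with
  | zero =>
      intro v cache path _ _ hex
      obtain ⟨k, hk, -, -⟩ := hex
      omega
  | succ f ih =>
      intro v cache path hinv hpath hex
      obtain ⟨k, hkf, hks, hfix⟩ := hex
      have hterm : TermAt d v := ⟨k, List.mem_range.mpr (by omega), hfix⟩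
      simp only [bFind]
      by_cases hcond : cache.contains v = false ∧ d.getD v v ≠ v
      · rw [if_pos hcond]
        obtain ⟨hcv, hne⟩ := hcond
        obtain ⟨hroot, -⟩ := troot_step d v hterm hne
        cases k with
        | zero => exact absurd (by simpa using hfix) hne
        | succ k =>
          have hstep : (fun w => d.getD w w)^[k + 1] (d.getD v v)
              = (fun w => d.getD w w)^[k] (d.getD v v) := by
            have h1 : (fun w => d.getD w w)^[k + 1 + 1] v
                = (fun w => d.getD w w)^[k + 1] (d.getD v v) :=
              Function.iterate_succ_apply (fun w => d.getD w w) (k + 1) v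
            have h2 : (fun w => d.getD w w)^[k + 1] v
                = (fun w => d.getD w w)^[k] (d.getD v v) :=
              Function.iterate_succ_apply (fun w => d.getD w w) k v
            rw [h1, h2] at hfix
            exact hfix
          have hres := ih (d.getD v v) cache (path ++ [v]) hinv
            (by
              intro u hu
              rw [hroot]
              rcases List.mem_append.mp hu with h | h
              · exact hpath u h
              · simp at h; rw [h])
            ⟨k, by omega, by omega, hstep⟩
          rw [hroot] at hres
          exact hres
      · rw [if_neg hcond]
        have hr : cache.getD v v = aFindRoot d (d.size + 1) v := by
          by_cases hcv : cache.contains v = true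
          · have hsome : (cache.get? v).isSome := by
              rw [← PySem.Dict.contains_eq_isSome_get?]; exact hcv
            obtain ⟨r', hr'⟩ := Option.isSome_iff_exists.mp hsome
            rw [PySem.Dict.getD_eq_get?_getD, hr']
            exact hinv v r' hr'
          · have hcf : cache.contains v = false := by
              cases h : cache.contains v
              · rfl
              · exact absurd h hcv
            have hfixv : d.getD v v = v := by
              by_contra hne
              exact hcond ⟨hcf, hne⟩
            rw [PySem.Dict.getD_of_not_contains cache v hcf]
            rw [aFindRoot_of_fix d 0 (d.size + 1) v (by simpa using hfixv) (by omega)]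
            rfl
        refine ⟨hr, ?_⟩
        refine inv_writeback d (cache.getD v v) path cache hinv ?_
        intro u hu
        rw [hr]
        exact hpath u hu

theorem groups_fold_eq (d : PySem.Dict Int Int) :
    ∀ (ks : List Int) (g : PySem.Dict Int (List Int)) (cache : PySem.Dict Int Int),
      CacheInv d cache → (∀ v ∈ ks, TermAt d v) →
      (ks.foldl
        (fun (acc : PySem.Dict Int (List Int) × PySem.Dict Int Int) v =>
          let p := bFind d (d.size + 1) acc.2 [] v
          (acc.1.modify p.1 [] (· ++ [v]), p.2))
        (g, cache)).1
      = ks.foldl (fun comps v => comps.modify (aFindRoot d (d.size + 1) v) [] (· ++ [v])) g := by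
  intro ks
  induction ks with
  | nil => intro g cache _ _; rfl
  | cons v ks ih =>
      intro g cache hinv hterm
      obtain ⟨k, hk, hfix⟩ := hterm v (by simp)
      rw [List.mem_range] at hk
      have hb := bFind_spec d (d.size + 1) v cache [] hinv (by simp)
        ⟨k, by omega, by omega, hfix⟩
      have hrest := ih (g.modify (aFindRoot d (d.size + 1) v) [] (· ++ [v]))
        (bFind d (d.size + 1) cache [] v).2 hb.2 (fun u hu => hterm u (by simp [hu]))
      simp only [List.foldl_cons]
      rw [← hrest, hb.1]

-- ===== VERDICT (by name: the statement is the Claim_ definition above) =====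
theorem format_union_find_py_spec : Claim_equal_format_union_find_py := by
  intro uf_state _ hpre
  unfold Spec_format_union_find_py format_union_find_py format_union_find_py_alt
  set d := PySem.Dict.ofList uf_state with hd
  have hterm : ∀ v, TermAt d v := termAt_all uf_state hpre
  have hgroups := groups_fold_eq d (PySem.List.sorted d.keys (fun x => x) false)
    PySem.Dict.empty PySem.Dict.empty
    (by intro u r h; rw [PySem.Dict.get?_empty] at h; cases h)
    (fun v _ => hterm v)
  simp only [hgroups]
  rw [PySem.List.foldl_append_singleton_eq_map]
  rfl
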